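-- pv_equiv track=rewrite | github.com/Dirty13itch/athanor | projects/agents/src/athanor_agents/operator_tests.py | _build_operator_tests_status
-- ===== SOURCE A (Python) =====
-- from typing import Any, Awaitable, Callable
--
-- def _build_operator_tests_status(flows: list[dict[str, Any]]) -> tuple[str, str]:
--     if not flows:
--         return "configured", "not_run"
--
--     outcomes = {str(flow.get("last_outcome") or "") for flow in flows}
--     statuses = {str(flow.get("status") or "configured") for flow in flows}
--
--     if "failed" in outcomes or "degraded" in statuses:
--         return "degraded", "failed"
--     if statuses == {"live"}:
--         return "live", "passed"
--     if any(status in {"live", "live_partial"} for status in statuses):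
--         return "live_partial", "partial"
--     return "configured", "partial"
-- ===== SOURCE B (Python) =====
-- def _build_operator_tests_status(flows: list[dict[str, any]]) -> tuple[str, str]:
--     # Map each flow to a numeric severity rank, then reduce with max()/min():
--     # 3 = failing (failed outcome or degraded status), 2 = live, 1 = live_partial, 0 = other.
--     if not flows:
--         return "configured", "not_run"
--
--     def rank(flow):
--         outcome = str(flow.get("last_outcome") or "")
--         status = str(flow.get("status") or "configured")
--         if outcome == "failed" or status == "degraded":
--             return 3
--         if status == "live":
--             return 2
--         if status == "live_partial":
--             return 1
--         return 0
--
--     ranks = [rank(flow) for flow in flows]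
--     hi = max(ranks)
--     lo = min(ranks)
--     if hi == 3:
--         return "degraded", "failed"
--     if lo == 2:
--         return "live", "passed"
--     if hi >= 1:
--         return "live_partial", "partial"
--     return "configured", "partial"
-- ===== Notes on version B (the rewrite author's own statement) =====
-- stated objective: alternative
-- what changed: Replaces building two deduplicated string sets and a membership/set-equality cascade with a numeric severity lattice: each flow is mapped to a rank 0-3 and the answer is read off max(ranks) and min(ranks) (max==3 -> degraded; min==2 -> all live; max>=1 -> partial).
import Mathlib
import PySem

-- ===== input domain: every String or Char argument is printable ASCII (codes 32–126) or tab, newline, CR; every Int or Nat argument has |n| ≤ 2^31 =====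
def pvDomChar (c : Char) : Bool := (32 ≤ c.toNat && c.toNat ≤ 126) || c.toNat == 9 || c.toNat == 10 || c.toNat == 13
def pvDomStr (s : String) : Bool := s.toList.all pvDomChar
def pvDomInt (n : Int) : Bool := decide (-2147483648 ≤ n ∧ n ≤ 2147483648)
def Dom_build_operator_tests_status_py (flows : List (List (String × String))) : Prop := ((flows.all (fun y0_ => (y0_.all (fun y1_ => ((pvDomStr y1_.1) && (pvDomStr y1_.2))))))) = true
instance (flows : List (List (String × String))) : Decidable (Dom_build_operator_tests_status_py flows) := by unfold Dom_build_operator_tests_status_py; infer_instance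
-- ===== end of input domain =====

-- B replaces A's two deduplicated sets and membership/set-equality cascade with a numeric
-- severity lattice: each flow gets a rank 0-3 and the answer is read off max/min of the ranks.

-- shared coercion helper: str(opt or dflt) for string-valued dict lookups
def pvStrOr (v : Option String) (dflt : String) : String :=
  match v with
  | none => dflt
  | some s => if s = "" then dflt else s

-- str(flow.get("last_outcome") or "")
def pvOutcome (flow : List (String × String)) : String :=
  pvStrOr ((PySem.Dict.mk flow).get? "last_outcome") ""

-- str(flow.get("status") or "configured")
def pvStatus (flow : List (String × String)) : String :=
  pvStrOr ((PySem.Dict.mk flow).get? "status") "configured"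

-- ===== PORT A =====
def build_operator_tests_status_py (flows : List (List (String × String))) : String × String :=
  if flows = [] then ("configured", "not_run")
  else
    let outcomes : PySem.Set String := PySem.Set.ofList (flows.map pvOutcome)
    let statuses : PySem.Set String := PySem.Set.ofList (flows.map pvStatus)
    if PySem.Set.contains outcomes "failed" || PySem.Set.contains statuses "degraded" then
      ("degraded", "failed")
    else if PySem.Set.equal statuses (PySem.Set.ofList ["live"]) then
      ("live", "passed")
    else if statuses.any (fun status => status == "live" || status == "live_partial") then
      ("live_partial", "partial")
    else
      ("configured", "partial")

-- ===== PORT B =====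
-- B's inner rank(flow) helper
def pvRank (flow : List (String × String)) : Int :=
  if pvOutcome flow = "failed" ∨ pvStatus flow = "degraded" then 3
  else if pvStatus flow = "live" then 2
  else if pvStatus flow = "live_partial" then 1
  else 0

def build_operator_tests_status_py_alt (flows : List (List (String × String))) : String × String :=
  if flows = [] then ("configured", "not_run")
  else
    let ranks := flows.map pvRank
    -- max(ranks) / min(ranks); the fallback branch is unreachable (ranks nonempty)
    match PySem.List.max? ranks (fun y => y), PySem.List.min? ranks (fun y => y) with
    | some hi, some lo =>
        if hi = 3 then ("degraded", "failed")
        else if lo = 2 then ("live", "passed")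
        else if 1 ≤ hi then ("live_partial", "partial")
        else ("configured", "partial")
    | _, _ => ("configured", "not_run")

-- ===== PRECONDITION & SPEC =====
def Spec_build_operator_tests_status_py (flows : List (List (String × String))) (out : String × String) : Prop := out = build_operator_tests_status_py_alt flows
instance (flows : List (List (String × String))) (out : String × String) : Decidable (Spec_build_operator_tests_status_py flows out) := by unfold Spec_build_operator_tests_status_py; infer_instance

-- ===== CLAIM (what is proved, stated in full; the proofs are below) =====
def Claim_equal_build_operator_tests_status_py : Prop := ∀ (flows : List (List (String × String))), Dom_build_operator_tests_status_py flows → Spec_build_operator_tests_status_py flows (build_operator_tests_status_py flows)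

-- ===== LEMMAS AND PROOFS =====

theorem pv_contains_ofList {α : Type} [BEq α] [LawfulBEq α] (l : List α) (y : α) :
    PySem.Set.contains (PySem.Set.ofList l) y = l.any (fun x => x == y) := by
  rw [Bool.eq_iff_iff]
  simp only [PySem.Set.contains_iff, PySem.Set.mem_ofList, List.any_eq_true, beq_iff_eq]
  exact ⟨fun h => ⟨y, h, rfl⟩, fun ⟨x, hx, he⟩ => he ▸ hx⟩

theorem pv_any_ofList {α : Type} [BEq α] [LawfulBEq α] (l : List α) (p : α → Bool) :
    (PySem.Set.ofList l).any p = l.any p := by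
  rw [Bool.eq_iff_iff]
  simp [List.any_eq_true, PySem.Set.mem_ofList]

theorem pv_equal_live (l : List String) (h : l ≠ []) :
    PySem.Set.equal (PySem.Set.ofList l) (PySem.Set.ofList ["live"]) = l.all (fun x => x == "live") := by
  rw [Bool.eq_iff_iff, PySem.Set.equal_iff]
  simp only [PySem.Set.mem_ofList, List.all_eq_true, List.mem_singleton, beq_iff_eq]
  constructor
  · intro hmem x hx
    exact (hmem x).mp hx
  · intro hall x
    constructor
    · intro hx; exact hall x hx
    · intro hx
      obtain ⟨z, hz⟩ := List.exists_mem_of_ne_nil l h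
      have := hall z hz
      subst hx; rwa [← this]

-- A's set cascade, restated as list predicates over the flows
theorem pv_A_char (flows : List (List (String × String))) (h : flows ≠ []) :
    build_operator_tests_status_py flows =
      if flows.any (fun f => pvOutcome f == "failed") || flows.any (fun f => pvStatus f == "degraded") then ("degraded", "failed")
      else if flows.all (fun f => pvStatus f == "live") then ("live", "passed")
      else if flows.any (fun f => pvStatus f == "live" || pvStatus f == "live_partial") then ("live_partial", "partial")
      else ("configured", "partial") := by
  unfold build_operator_tests_status_py
  simp only [if_neg h, pv_contains_ofList, pv_any_ofList, List.any_map, List.all_map,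
    pv_equal_live (flows.map pvStatus) (by simpa using h)]
  rfl

theorem pvRank_le_three (f : List (String × String)) : pvRank f ≤ 3 := by
  unfold pvRank; split_ifs <;> norm_num

theorem pvRank_cases (f : List (String × String)) :
    pvRank f = 0 ∨ pvRank f = 1 ∨ pvRank f = 2 ∨ pvRank f = 3 := by
  unfold pvRank; split_ifs <;> simp

theorem pvRank_eq_three (f : List (String × String)) :
    pvRank f = 3 ↔ (pvOutcome f = "failed" ∨ pvStatus f = "degraded") := by
  unfold pvRank; split_ifs <;> simp_all

theorem pvRank_eq_two (f : List (String × String))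
    (h1 : ¬(pvOutcome f = "failed" ∨ pvStatus f = "degraded")) :
    pvRank f = 2 ↔ pvStatus f = "live" := by
  unfold pvRank; rw [if_neg h1]; split_ifs <;> simp_all

theorem pvRank_ge_one (f : List (String × String))
    (h1 : ¬(pvOutcome f = "failed" ∨ pvStatus f = "degraded")) :
    1 ≤ pvRank f ↔ (pvStatus f = "live" ∨ pvStatus f = "live_partial") := by
  unfold pvRank; rw [if_neg h1]; split_ifs <;> simp_all

-- ===== VERDICT (by name: the statement is the Claim_ definition above) =====
theorem build_operator_tests_status_py_spec : Claim_equal_build_operator_tests_status_py := by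
  intro flows _
  unfold Spec_build_operator_tests_status_py
  by_cases hnil : flows = []
  · simp [hnil, build_operator_tests_status_py, build_operator_tests_status_py_alt]
  · rw [pv_A_char flows hnil]
    unfold build_operator_tests_status_py_alt
    rw [if_neg hnil]
    have hr : flows.map pvRank ≠ [] := by simpa using hnil
    obtain ⟨hi, hhi⟩ : ∃ hi, PySem.List.max? (flows.map pvRank) (fun y => y) = some hi := by
      cases hmx : PySem.List.max? (flows.map pvRank) (fun y => y) with
      | none => exact absurd ((PySem.List.max?_eq_none_iff _ _).mp hmx) hr
      | some v => exact ⟨v, rfl⟩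
    obtain ⟨lo, hlo⟩ : ∃ lo, PySem.List.min? (flows.map pvRank) (fun y => y) = some lo := by
      cases hmn : PySem.List.min? (flows.map pvRank) (fun y => y) with
      | none => exact absurd ((PySem.List.min?_eq_none_iff _ _).mp hmn) hr
      | some v => exact ⟨v, rfl⟩
    simp only [hhi, hlo]
    have hhimax : ∀ y ∈ flows.map pvRank, y ≤ hi := PySem.List.max?_isMax hhi
    have hlomin : ∀ y ∈ flows.map pvRank, lo ≤ y := PySem.List.min?_isMin hlo
    obtain ⟨fh, hfh, hfhev⟩ := List.mem_map.mp (PySem.List.max?_mem hhi)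
    obtain ⟨fl, hfl, hflev⟩ := List.mem_map.mp (PySem.List.min?_mem hlo)
    have hhile3 : hi ≤ 3 := hfhev ▸ pvRank_le_three fh
    -- condition 1: hi = 3 ↔ some flow ranks 3 ↔ A's first test
    have c1 : (hi = 3) ↔ ((flows.any (fun f => pvOutcome f == "failed") || flows.any (fun f => pvStatus f == "degraded")) = true) := by
      simp only [Bool.or_eq_true, List.any_eq_true, beq_iff_eq]
      constructor
      · intro h3
        rcases (pvRank_eq_three fh).mp (hfhev.trans h3) with h | h
        · exact Or.inl ⟨fh, hfh, h⟩
        · exact Or.inr ⟨fh, hfh, h⟩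
      · rintro (⟨f, hf, h⟩ | ⟨f, hf, h⟩) <;>
        [ have hr3 : pvRank f = 3 := (pvRank_eq_three f).mpr (Or.inl h);
          have hr3 : pvRank f = 3 := (pvRank_eq_three f).mpr (Or.inr h)] <;>
        · have hle := hhimax (pvRank f) (List.mem_map_of_mem hf)
          omega
    by_cases h1 : hi = 3
    · rw [if_pos h1, if_pos (c1.mp h1)]
    · rw [if_neg h1, if_neg (fun hc => h1 (c1.mpr hc))]
      -- in this branch no flow ranks 3, i.e. no failed outcome / degraded status
      have hno3 : ∀ f ∈ flows, ¬(pvOutcome f = "failed" ∨ pvStatus f = "degraded") := by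
        intro f hf hc
        have hr3 : pvRank f = 3 := (pvRank_eq_three f).mpr hc
        have hle := hhimax (pvRank f) (List.mem_map_of_mem hf)
        omega
      have c2 : (lo = 2) ↔ ((flows.all (fun f => pvStatus f == "live")) = true) := by
        simp only [List.all_eq_true, beq_iff_eq]
        constructor
        · intro h2 f hf
          have hge := hlomin (pvRank f) (List.mem_map_of_mem hf)
          have hle := hhimax (pvRank f) (List.mem_map_of_mem hf)
          have hr2 : pvRank f = 2 := by rcases pvRank_cases f with h | h | h | h <;> omega
          exact (pvRank_eq_two f (hno3 f hf)).mp hr2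
        · intro hall
          have : pvRank fl = 2 := (pvRank_eq_two fl (hno3 fl hfl)).mpr (hall fl hfl)
          omega
      by_cases h2 : lo = 2
      · rw [if_pos h2, if_pos (c2.mp h2)]
      · rw [if_neg h2, if_neg (fun hc => h2 (c2.mpr hc))]
        have c3 : (1 ≤ hi) ↔ ((flows.any (fun f => pvStatus f == "live" || pvStatus f == "live_partial")) = true) := by
          simp only [List.any_eq_true, Bool.or_eq_true, beq_iff_eq]
          constructor
          · intro hge
            exact ⟨fh, hfh, (pvRank_ge_one fh (hno3 fh hfh)).mp (by omega)⟩
          · rintro ⟨f, hf, hst⟩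
            have hr1 := (pvRank_ge_one f (hno3 f hf)).mpr hst
            have hle := hhimax (pvRank f) (List.mem_map_of_mem hf)
            omega
        by_cases h3 : 1 ≤ hi
        · rw [if_pos h3, if_pos (c3.mp h3)]
        · rw [if_neg h3, if_neg (fun hc => h3 (c3.mpr hc))]
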